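-- pv_equiv track=rewrite | github.com/grlinski/hackerrank-solutions-python | HR Fraudulent Activity Notification Mk2.py | addRemove
-- ===== SOURCE A (Python) =====
-- def addRemove(toAdd,toRem,list1):
--     if toAdd == toRem:
--         return list1
--     list1.remove(toRem)
--     for i in range(0,len(list1)):
--         cur = list1[i]
--         if i == 0 and toAdd <= cur:
--             list1.insert(0,toAdd)
--             return list1
--         elif i == len(list1)-1 and toAdd >= cur:
--             list1.append(toAdd)
--             return list1
--         elif toAdd == cur:
--             list1.insert(i, toAdd)
--             return list1
--         else:
--             prev = list1[i-1]
--             if toAdd > prev and toAdd < cur: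
--                 list1.insert(i, toAdd)
--                 return list1
-- ===== SOURCE B (Python) =====
-- # B: pure functional rebuild — find the removal index, then splice toAdd in at the
-- # first position whose element is >= toAdd (same result as A's four-branch in-place
-- # scan); unlike A it does not mutate list1 (return value is the same).
-- def addRemove(toAdd, toRem, list1):
--     if toAdd == toRem:
--         return list1
--     j = list1.index(toRem)          # ValueError if missing, like list1.remove
--     rest = list1[:j] + list1[j + 1:]
--     pos = next((i for i, v in enumerate(rest) if toAdd <= v), len(rest))
--     return rest[:pos] + [toAdd] + rest[pos:]
-- ===== Notes on version B (the rewrite author's own statement) =====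
-- stated objective: simpler
-- what changed: B replaces A's in-place four-branch scan (with index mutation, wraparound prev lookup and three insertion cases) by a pure rebuild: locate the removal index, splice the list, and insert toAdd before the first element >= toAdd via a single-predicate scan, with no mutation of list1.
-- outside the precondition, e.g. on addRemove(5, 3, [3]): A returns None, B returns [5]
import Mathlib
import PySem

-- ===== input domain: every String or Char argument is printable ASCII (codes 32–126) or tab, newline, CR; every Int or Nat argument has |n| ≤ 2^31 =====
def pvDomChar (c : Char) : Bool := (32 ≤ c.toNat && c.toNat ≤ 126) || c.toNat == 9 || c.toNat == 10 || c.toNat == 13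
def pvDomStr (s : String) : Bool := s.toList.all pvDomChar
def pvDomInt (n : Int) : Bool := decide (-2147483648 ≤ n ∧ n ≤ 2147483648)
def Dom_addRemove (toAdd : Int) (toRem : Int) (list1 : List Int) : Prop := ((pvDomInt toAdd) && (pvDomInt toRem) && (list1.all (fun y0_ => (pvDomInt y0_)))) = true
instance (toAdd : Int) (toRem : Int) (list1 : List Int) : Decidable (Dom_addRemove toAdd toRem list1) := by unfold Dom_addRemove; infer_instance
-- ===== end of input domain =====

-- B is a pure rebuild (index + splice + single-predicate insertion scan) replacing A's
-- in-place four-branch loop; equivalence is about the RETURN value only (A mutates list1, B does not).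

-- ===== PORT A =====
-- the 'for i in range(0, len(list1))' loop; falling off the end is Python's implicit
-- 'return None' (reached only when the list is empty after removal; excluded by Pre_),
-- rendered as []
def addRemoveLoop (toAdd : Int) (L : List Int) (i : Nat) : List Int :=
  if h : i < L.length then
    let cur := L[i]
    if i = 0 ∧ toAdd ≤ cur then
      PySem.List.insert L 0 toAdd
    else if i = L.length - 1 ∧ toAdd ≥ cur then
      L ++ [toAdd]
    else if toAdd = cur then
      PySem.List.insert L (i : Int) toAdd
    else
      let prev := (PySem.List.pyGet? L ((i : Int) - 1)).getD 0  -- list1[i-1]; in range whenever read (i < len, wraps at i = 0)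
      if toAdd > prev ∧ toAdd < cur then
        PySem.List.insert L (i : Int) toAdd
      else
        addRemoveLoop toAdd L (i + 1)
  else L
termination_by L.length - i

def addRemove (toAdd : Int) (toRem : Int) (list1 : List Int) : List Int :=
  if toAdd = toRem then list1
  else
    match PySem.List.remove? list1 toRem with
    | none => []            -- ValueError from list1.remove(toRem); excluded by Pre_
    | some L => addRemoveLoop toAdd L 0

-- ===== PORT B =====
-- next((i for i, v in enumerate(rest) if toAdd <= v), len(rest))
def bFindPos (toAdd : Int) (l : List Int) : Nat :=
  match l with
  | [] => 0
  | v :: t => if toAdd ≤ v then 0 else bFindPos toAdd t + 1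

def addRemove_alt (toAdd : Int) (toRem : Int) (list1 : List Int) : List Int :=
  if toAdd = toRem then list1
  else
    match PySem.List.index? list1 toRem with
    | none => []            -- ValueError from list1.index(toRem); excluded by Pre_
    | some j =>
      let rest := PySem.List.slice list1 none (some (j : Int)) ++ PySem.List.slice list1 (some ((j : Int) + 1)) none
      let pos := bFindPos toAdd rest
      rest.take pos ++ [toAdd] ++ rest.drop pos

-- ===== PRECONDITION & SPEC =====
-- Pre_ excludes exactly: toRem missing (A raises ValueError) and list1 = [toRem] with
-- toAdd ≠ toRem, where A returns None, not a list (B returns [toAdd] there).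
def Pre_addRemove (toAdd : Int) (toRem : Int) (list1 : List Int) : Prop :=
  toAdd = toRem ∨ (toRem ∈ list1 ∧ 2 ≤ list1.length)
instance (toAdd : Int) (toRem : Int) (list1 : List Int) : Decidable (Pre_addRemove toAdd toRem list1) := by unfold Pre_addRemove; infer_instance
def pvWitness_addRemove : Int × Int × List Int := (3, 2, [1, 2, 5])

def Spec_addRemove (toAdd : Int) (toRem : Int) (list1 : List Int) (out : List Int) : Prop := out = addRemove_alt toAdd toRem list1
instance (toAdd : Int) (toRem : Int) (list1 : List Int) (out : List Int) : Decidable (Spec_addRemove toAdd toRem list1 out) := by unfold Spec_addRemove; infer_instance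

-- ===== CLAIM (what is proved, stated in full; the proofs are below) =====
def Claim_equal_addRemove : Prop := ∀ (toAdd : Int) (toRem : Int) (list1 : List Int), Dom_addRemove toAdd toRem list1 → Pre_addRemove toAdd toRem list1 → Spec_addRemove toAdd toRem list1 (addRemove toAdd toRem list1)

-- ===== LEMMAS AND PROOFS =====

lemma loop_eq_aux (toAdd : Int) (L : List Int) (n : Nat) :
    ∀ (i : Nat), L.length - i = n → ∀ (hi : i < L.length),
    (∀ j (hj : j < i), L[j]'(Nat.lt_trans hj hi) < toAdd) →
    addRemoveLoop toAdd L i =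
      L.take (i + bFindPos toAdd (L.drop i)) ++ toAdd :: L.drop (i + bFindPos toAdd (L.drop i)) := by
  induction n with
  | zero => intro i hn hi _; omega
  | succ n ih =>
    intro i hn hi hinv
    have hdrop : L.drop i = L[i] :: L.drop (i + 1) := List.drop_eq_getElem_cons hi
    rw [addRemoveLoop]
    simp only [dif_pos hi]
    by_cases h1 : i = 0 ∧ toAdd ≤ L[i]
    · rw [if_pos h1]
      obtain ⟨h10, h1le⟩ := h1
      subst h10
      rw [List.drop_zero] at hdrop ⊢
      rw [hdrop]
      simp [bFindPos, if_pos h1le, PySem.List.insert_zero]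
    · rw [if_neg h1]
      by_cases h2 : i = L.length - 1 ∧ toAdd ≥ L[i]
      · rw [if_pos h2]
        obtain ⟨h2i, h2ge⟩ := h2
        have hlast : i + 1 = L.length := by omega
        have hdrop1 : L.drop (i + 1) = [] := by
          rw [hlast, List.drop_length]
        have hd : L.drop i = [L[i]] := by rw [hdrop, hdrop1]
        by_cases hle : toAdd ≤ L[i]
        · -- toAdd = L[i]: A appends after, B inserts before the single equal element
          have heq : toAdd = L[i] := le_antisymm hle h2ge
          simp only [hd, bFindPos, if_pos hle, Nat.add_zero]
          conv_lhs => rw [← List.take_append_drop i L, hd]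
          rw [heq]
          simp only [List.append_assoc, List.cons_append, List.nil_append]
        · simp only [hd, bFindPos, if_neg hle]
          rw [show i + (0 + 1) = L.length by omega]
          simp
      · rw [if_neg h2]
        by_cases h3 : toAdd = L[i]
        · rw [if_pos h3]
          rw [PySem.List.insert_natCast L i toAdd (le_of_lt hi)]
          simp only [hdrop, bFindPos, if_pos (le_of_eq h3), Nat.add_zero]
        · rw [if_neg h3]
          by_cases hcur : toAdd < L[i]
          · -- prev = L[i-1] < toAdd by the invariant, so the bracket branch fires
            have hi0 : i ≠ 0 := fun h0 => h1 ⟨h0, le_of_lt hcur⟩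
            have hcast : (i : Int) - 1 = ((i - 1 : Nat) : Int) := by omega
            have hprev : (PySem.List.pyGet? L ((i : Int) - 1)).getD 0 = L[i - 1]'(by omega) := by
              rw [hcast, PySem.List.pyGet?_natCast]
              simp [List.getElem?_eq_getElem (show i - 1 < L.length by omega)]
            rw [hprev]
            rw [if_pos ⟨hinv (i - 1) (by omega), hcur⟩]
            rw [PySem.List.insert_natCast L i toAdd (le_of_lt hi)]
            simp only [hdrop, bFindPos, if_pos (le_of_lt hcur), Nat.add_zero]
          · -- toAdd > L[i]: no branch fires, continue the scan
            have hgt : L[i] < toAdd := lt_of_le_of_ne (not_lt.1 hcur) (fun h => h3 h.symm)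
            have hni : i ≠ L.length - 1 := fun h => h2 ⟨h, le_of_lt hgt⟩
            have hi1 : i + 1 < L.length := by omega
            rw [if_neg (by push Not; intro _; exact not_lt.1 hcur)]
            rw [ih (i + 1) (by omega) hi1 (by
              intro j hj
              rcases Nat.lt_succ_iff_lt_or_eq.1 hj with h | h
              · exact hinv j h
              · subst h; exact hgt)]
            simp only [hdrop, bFindPos, if_neg (not_le.2 hgt)]
            rw [show i + (bFindPos toAdd (L.drop (i + 1)) + 1) = i + 1 + bFindPos toAdd (L.drop (i + 1)) by omega]

lemma loop_eq (toAdd : Int) (L : List Int) (i : Nat) (hi : i < L.length)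
    (hinv : ∀ j (hj : j < i), L[j]'(Nat.lt_trans hj hi) < toAdd) :
    addRemoveLoop toAdd L i =
      L.take (i + bFindPos toAdd (L.drop i)) ++ toAdd :: L.drop (i + bFindPos toAdd (L.drop i)) :=
  loop_eq_aux toAdd L (L.length - i) i rfl hi hinv

lemma remove_eq_splice (toRem : Int) (list1 : List Int) (j : Nat)
    (hj : PySem.List.index? list1 toRem = some j) :
    PySem.List.remove? list1 toRem = some (list1.take j ++ list1.drop (j + 1)) := by
  obtain ⟨pre, suf, hsplit, hlen, hnot⟩ := (PySem.List.index?_eq_some_iff list1 toRem j).1 hj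
  subst hsplit
  have hmem : toRem ∈ pre ++ toRem :: suf := by simp
  rw [PySem.List.remove?_eq_some_erase _ _ hmem]
  rw [List.erase_append_right _ hnot]
  simp [List.erase_cons_head]
  subst hlen
  have h1 : List.take pre.length (pre ++ toRem :: suf) = pre := by
    exact List.take_left ..
  have h2 : List.drop (pre.length + 1) (pre ++ toRem :: suf) = suf := by
    rw [show pre ++ toRem :: suf = (pre ++ [toRem]) ++ suf by simp,
        show pre.length + 1 = (pre ++ [toRem]).length by simp]
    exact List.drop_left ..
  rw [h1, h2]

-- ===== VERDICT (by name: the statement is the Claim_ definition above) =====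
theorem addRemove_spec : Claim_equal_addRemove := by
  intro toAdd toRem list1 _ hpre
  unfold Spec_addRemove addRemove addRemove_alt
  by_cases heq : toAdd = toRem
  · simp [heq]
  rcases hpre with h | ⟨hmem, hlen2⟩
  · exact absurd h heq
  rw [if_neg heq, if_neg heq]
  have hsome : (PySem.List.index? list1 toRem).isSome := (PySem.List.index?_isSome_iff list1 toRem).2 hmem
  obtain ⟨j, hj⟩ := Option.isSome_iff_exists.1 hsome
  obtain ⟨hjlt, -, -⟩ := PySem.List.getElem_of_index?_eq_some hj
  rw [hj, remove_eq_splice toRem list1 j hj]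
  have hrest : PySem.List.slice list1 none (some (j : Int)) ++ PySem.List.slice list1 (some ((j : Int) + 1)) none
      = list1.take j ++ list1.drop (j + 1) := by
    rw [PySem.List.slice_to_natCast,
        show ((j : Int) + 1) = (((j + 1 : Nat) : Int)) by push_cast; ring,
        PySem.List.slice_from_natCast]
  simp only [hrest]
  have hlen : 0 < (list1.take j ++ list1.drop (j + 1)).length := by
    simp [List.length_take, List.length_drop]
    omega
  rw [loop_eq toAdd _ 0 hlen (by intro j hj; omega)]
  simp
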